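-- pv_equiv track=rewrite | github.com/justinshenk/temporal-awareness | scripts/experiments/phase3_prompt_dimensions.py | build_repetition_prefix
-- ===== SOURCE A (Python) =====
-- FILLER_TEMPLATES = [
--     "Continue with the next item. ",
--     "Proceed to the following task. ",
--     "Moving on to another similar request. ",
--     "Here is another one to process. ",
--     "Next task in the sequence. ",
--     "Please handle the following as well. ",
--     "Another item for you to address. ",
--     "Keep going with the next one. ",
--     "Process this additional request. ",
--     "One more for you to complete. ",
-- ]
--
-- def build_repetition_prefix(rep_count: int) -> str:
--     """Build the repetition filler prefix (matching Phase 2/3 convention)."""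
--     if rep_count <= 1:
--         return ""
--     parts = []
--     for i in range(rep_count - 1):
--         filler = FILLER_TEMPLATES[i % len(FILLER_TEMPLATES)]
--         parts.append(filler)
--     return "".join(parts)
-- ===== SOURCE B (Python) =====
-- FILLER_TEMPLATES = [
--     "Continue with the next item. ",
--     "Proceed to the following task. ",
--     "Moving on to another similar request. ",
--     "Here is another one to process. ",
--     "Next task in the sequence. ",
--     "Please handle the following as well. ",
--     "Another item for you to address. ",
--     "Keep going with the next one. ",
--     "Process this additional request. ",
--     "One more for you to complete. ",
-- ]
--
--
-- CYCLE = "".join(FILLER_TEMPLATES)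
--
--
-- def build_repetition_prefix(rep_count: int) -> str:
--     """Build the repetition filler prefix (matching Phase 2/3 convention)."""
--     if rep_count <= 1:
--         return ""
--     q, r = divmod(rep_count - 1, len(FILLER_TEMPLATES))
--     return CYCLE * q + "".join(FILLER_TEMPLATES[:r])
-- ===== Notes on version B (the rewrite author's own statement) =====
-- stated objective: faster
-- what changed: Replaces the per-index modulo loop appending one filler per iteration with a divmod computation: string-multiply a precomputed full cycle q times and append the first r templates.
import Mathlib
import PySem

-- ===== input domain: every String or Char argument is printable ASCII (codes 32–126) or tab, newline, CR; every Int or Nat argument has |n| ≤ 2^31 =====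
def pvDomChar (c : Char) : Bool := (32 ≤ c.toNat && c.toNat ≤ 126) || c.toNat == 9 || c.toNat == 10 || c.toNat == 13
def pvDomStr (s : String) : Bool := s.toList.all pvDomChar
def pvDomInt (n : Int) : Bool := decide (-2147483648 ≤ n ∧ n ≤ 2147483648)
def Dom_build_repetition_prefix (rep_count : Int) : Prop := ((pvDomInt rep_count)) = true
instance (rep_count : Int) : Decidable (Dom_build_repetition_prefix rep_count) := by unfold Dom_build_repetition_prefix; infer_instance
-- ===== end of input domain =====

-- B replaces A's per-index modulo loop by a divmod: q whole copies of the template list plus the first r templates, joined once.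


def FILLER_TEMPLATES : List String := [
  "Continue with the next item. ",
  "Proceed to the following task. ",
  "Moving on to another similar request. ",
  "Here is another one to process. ",
  "Next task in the sequence. ",
  "Please handle the following as well. ",
  "Another item for you to address. ",
  "Keep going with the next one. ",
  "Process this additional request. ",
  "One more for you to complete. "]

-- ===== PORT A =====
-- FILLER_TEMPLATES[i % 10]: the index is always in [0, 10), so pyGetD with default "" is exact.
def build_repetition_prefix (rep_count : Int) : String :=
  if rep_count ≤ 1 then ""
  else
    -- parts.append(filler) accumulated as cons with one final reverse (same list, linear time)
    let parts := ((PySem.List.pyRange 0 (rep_count - 1) 1).foldl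
      (fun parts i =>
        PySem.List.pyGetD FILLER_TEMPLATES
          (PySem.Int.mod i (FILLER_TEMPLATES.length : Int)) "" :: parts)
      []).reverse
    PySem.Str.join "" parts

-- ===== PORT B =====
def CYCLE : String := PySem.Str.join "" FILLER_TEMPLATES

def build_repetition_prefix_alt (rep_count : Int) : String :=
  if rep_count ≤ 1 then ""
  else
    let q := PySem.Int.floordiv (rep_count - 1) (FILLER_TEMPLATES.length : Int)
    let r := PySem.Int.mod (rep_count - 1) (FILLER_TEMPLATES.length : Int)
    -- CYCLE * q + "".join(...): string repetition and concatenation ported on code points (exact)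
    String.ofList (PySem.List.pyRepeat CYCLE.toList q ++
      (PySem.Str.join "" (PySem.List.slice FILLER_TEMPLATES none (some r))).toList)

-- ===== PRECONDITION & SPEC =====
def Spec_build_repetition_prefix (rep_count : Int) (out : String) : Prop := out = build_repetition_prefix_alt rep_count
instance (rep_count : Int) (out : String) : Decidable (Spec_build_repetition_prefix rep_count out) := by unfold Spec_build_repetition_prefix; infer_instance

-- ===== CLAIM (what is proved, stated in full; the proofs are below) =====
def Claim_equal_build_repetition_prefix : Prop := ∀ (rep_count : Int), Dom_build_repetition_prefix rep_count → Spec_build_repetition_prefix rep_count (build_repetition_prefix rep_count)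

-- ===== LEMMAS AND PROOFS =====

-- An append-accumulating loop done as cons plus one final reverse is the map of the loop body.
theorem foldl_cons_reverse_eq_map {α β : Type} (f : α → β) (l : List α) :
    (l.foldl (fun acc x => f x :: acc) []).reverse = l.map f := by
  simp

-- "".join with empty separator is list flattening.
theorem join_nil_eq_flatten (ps : List (List Char)) : PySem.Chars.join [] ps = ps.flatten := by
  induction ps with
  | nil => simp [PySem.Chars.join_nil]
  | cons p rest ih =>
    cases rest with
    | nil => simp [PySem.Chars.join_singleton]
    | cons b t => rw [PySem.Chars.join_cons_cons]; simp [ih]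

-- Flattening k copies of T and then each element equals flattening k copies of the flattened T.
theorem flatten_map_flatten_replicate {α β : Type} (f : α → List β) (T : List α) (k : Nat) :
    (((List.replicate k T).flatten).map f).flatten = (List.replicate k ((T.map f).flatten)).flatten := by
  induction k with
  | zero => simp
  | succ k ih =>
    rw [List.replicate_succ, List.replicate_succ, List.flatten_cons, List.flatten_cons,
        List.map_append, List.flatten_append, ih]

-- The cyclic index map over range m produces exactly ⌊m/L⌋ whole copies of T followed by its first m % L elements.
theorem cycle_map_range {α : Type} (T : List α) (d : α) (hT : T ≠ []) (m : Nat) :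
    (List.range m).map (fun k => T.getD (k % T.length) d) =
      (List.replicate (m / T.length) T).flatten ++ T.take (m % T.length) := by
  have hL : 0 < T.length := List.length_pos_iff.mpr hT
  induction m with
  | zero => simp
  | succ m ih =>
    rw [List.range_succ, List.map_append, ih, List.map_singleton]
    have hlt : m % T.length < T.length := Nat.mod_lt m hL
    have hgetD : T.getD (m % T.length) d = T[m % T.length] := List.getD_eq_getElem T d hlt
    have hdm := Nat.div_add_mod' m T.length
    by_cases hlast : m % T.length = T.length - 1
    · have h1 : m + 1 = T.length + m / T.length * T.length := by omega
      have hr : (m + 1) % T.length = 0 := by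
        rw [h1, Nat.add_mul_mod_self_right, Nat.mod_self]
      have hq : (m + 1) / T.length = m / T.length + 1 := by
        rw [h1, Nat.add_mul_div_right _ _ hL, Nat.div_self hL]; omega
      rw [hq, hr, List.replicate_succ', List.flatten_append]
      have htake : T.take (m % T.length) ++ [T[m % T.length]] = T := by
        rw [← List.take_succ_eq_append_getElem hlt]
        have h2 : m % T.length + 1 = T.length := by omega
        rw [h2, List.take_length]
      simp only [List.append_assoc, hgetD, htake]
      simp
    · have h1 : m + 1 = (m % T.length + 1) + m / T.length * T.length := by omega
      have hlt1 : m % T.length + 1 < T.length := by omega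
      have hr : (m + 1) % T.length = m % T.length + 1 := by
        rw [h1, Nat.add_mul_mod_self_right, Nat.mod_eq_of_lt hlt1]
      have hq : (m + 1) / T.length = m / T.length := by
        rw [h1, Nat.add_mul_div_right _ _ hL, Nat.div_eq_of_lt hlt1]; omega
      rw [hq, hr, List.append_assoc, hgetD, ← List.take_succ_eq_append_getElem hlt]

theorem build_repetition_prefix_eq (rep_count : Int) :
    build_repetition_prefix rep_count = build_repetition_prefix_alt rep_count := by
  unfold build_repetition_prefix build_repetition_prefix_alt
  by_cases h : rep_count ≤ 1
  · rw [if_pos h, if_pos h]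
  · rw [if_neg h, if_neg h]
    have hn : rep_count - 1 = ((rep_count - 1).toNat : Int) := by omega
    rw [hn, foldl_cons_reverse_eq_map]
    set m := (rep_count - 1).toNat with hm
    have hmod : ∀ k : Nat, PySem.Int.mod (k : Int) ((FILLER_TEMPLATES.length : Nat) : Int)
        = ((k % FILLER_TEMPLATES.length : Nat) : Int) := by
      intro k; simp [PySem.Int.mod, Int.fmod_eq_emod]
    have hdiv : PySem.Int.floordiv ((m : Nat) : Int) ((FILLER_TEMPLATES.length : Nat) : Int)
        = ((m / FILLER_TEMPLATES.length : Nat) : Int) := by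
      simp [PySem.Int.floordiv, Int.fdiv_eq_ediv]
    rw [PySem.List.pyRange_zero_nat, List.map_map]
    simp only [Function.comp_def, hmod, PySem.List.pyGetD_natCast]
    rw [PySem.List.slice_to_natCast,
        cycle_map_range FILLER_TEMPLATES "" (by unfold FILLER_TEMPLATES; exact List.cons_ne_nil _ _) m, hdiv]
    rw [← String.toList_inj]
    simp only [PySem.Str.toList_join, String.toList_ofList, PySem.List.pyRepeat,
      Int.toNat_natCast, CYCLE, join_nil_eq_flatten, String.toList_empty,
      List.map_append, List.flatten_append, flatten_map_flatten_replicate]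

-- ===== VERDICT (by name: the statement is the Claim_ definition above) =====
theorem build_repetition_prefix_spec : Claim_equal_build_repetition_prefix := by
  intro rep_count _
  exact build_repetition_prefix_eq rep_count
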